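-- pv_equiv track=rewrite | github.com/wzygxr/shuati | class023_Heap/Code28_MoreHeapProblems.py | minimize_max_lateness
-- ===== SOURCE A (Python) =====
-- import heapq
-- from typing import List
--
-- def minimize_max_lateness(tasks: List[List[int]]) -> int:
--     """
--     题目18: HackerEarth - 最小化最大延迟
--     时间复杂度: O(n log n)
--     空间复杂度: O(n)
--     """
--     # 按截止时间排序
--     tasks.sort(key=lambda x: x[1])
--
--     # 最大堆存储任务处理时间
--     max_heap = []
--     current_time = 0
--     max_lateness = 0
--
--     for duration, deadline in tasks:
--         current_time += duration
--         heapq.heappush(max_heap, -duration)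
--
--         if current_time > deadline:
--             # 移除最耗时的任务
--             current_time -= -heapq.heappop(max_heap)
--
--         max_lateness = max(max_lateness, max(0, current_time - deadline))
--
--     return max_lateness
-- ===== SOURCE B (Python) =====
-- from typing import List
--
--
-- def minimize_max_lateness(tasks: List[List[int]]) -> int:
--     # Same greedy, but the retained durations live in a plain list:
--     # on overload we scan it for the max and delete one occurrence,
--     # instead of maintaining a negated max-heap.
--     tasks.sort(key=lambda x: x[1])
--
--     kept = []          # durations of the tasks currently kept
--     current_time = 0
--     max_lateness = 0
--
--     for duration, deadline in tasks:
--         kept.append(duration)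
--         current_time += duration
--
--         if current_time > deadline:
--             m = max(kept)
--             kept.remove(m)
--             current_time -= m
--
--         lateness = current_time - deadline
--         if lateness > max_lateness:
--             max_lateness = lateness
--
--     return max_lateness
-- ===== Notes on version B (the rewrite author's own statement) =====
-- stated objective: simpler
-- what changed: The negated max-heap (heapq with sign flips) is replaced by a plain list of kept durations: on overload B scans the list with max() and deletes one occurrence with list.remove(), and the running maximum is updated by a direct comparison instead of nested max() calls; no heapq and no negation trick remain.
import Mathlib
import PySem

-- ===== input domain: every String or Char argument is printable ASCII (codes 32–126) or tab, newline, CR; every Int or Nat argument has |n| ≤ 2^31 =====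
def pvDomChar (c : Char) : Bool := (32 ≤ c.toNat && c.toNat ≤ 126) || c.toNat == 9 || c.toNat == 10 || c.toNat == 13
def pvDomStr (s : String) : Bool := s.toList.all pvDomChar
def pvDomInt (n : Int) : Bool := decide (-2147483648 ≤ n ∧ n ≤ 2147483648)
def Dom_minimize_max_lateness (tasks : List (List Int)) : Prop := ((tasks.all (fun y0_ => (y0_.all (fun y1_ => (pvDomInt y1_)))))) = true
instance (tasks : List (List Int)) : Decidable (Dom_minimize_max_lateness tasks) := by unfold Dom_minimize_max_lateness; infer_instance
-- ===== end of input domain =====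

-- B replaces A's negated max-heap by a plain list of kept durations (max/remove scan,
-- direct comparison for the running maximum): simpler, not faster. Both A and B sort
-- `tasks` in place; the equivalence proved here is about the return value.


-- ===== PORT A =====
-- heapq is ported value-faithfully: the heap is the list of pushed (negated) values,
-- heappush prepends, and heappop returns the minimum value and removes one occurrence
-- of it — exact here, since only the popped VALUE and the remaining multiset of values
-- are observable in this function.
def pvHeapPopMin (h : List Int) : Int × List Int :=
  match h with
  | [] => (0, [])            -- unreachable: A pops only immediately after a push
  | x :: xs =>
    let m := xs.foldl min x
    (m, (x :: xs).erase m)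

def pvALoop : List (List Int) → List Int → Int → Int → Int
  | [], _, _, max_lateness => max_lateness
  | t :: rest, max_heap, current_time, max_lateness =>
    match t with
    | [duration, deadline] =>
      let ct1 := current_time + duration
      let h1 := (-duration) :: max_heap
      let s :=
        if decide (ct1 > deadline) then
          let p := pvHeapPopMin h1
          (p.2, ct1 - (-p.1))
        else (h1, ct1)
      pvALoop rest s.1 s.2 (max max_lateness (max 0 (s.2 - deadline)))
    | _ => 0                 -- unreachable under Pre_: Python raises ValueError (unpack)

def minimize_max_lateness (tasks : List (List Int)) : Int :=
  pvALoop (PySem.List.sorted tasks (fun x => PySem.List.pyGetD x 1 0)) [] 0 0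

-- ===== PORT B =====
def pvBLoop : List (List Int) → List Int → Int → Int → Int
  | [], _, _, max_lateness => max_lateness
  | t :: rest, kept, current_time, max_lateness =>
    match t with
    | [duration, deadline] =>
      let kept1 := kept ++ [duration]
      let ct1 := current_time + duration
      let s :=
        if decide (ct1 > deadline) then
          match PySem.List.max? kept1 (fun y => y) with
          | some m => ((PySem.List.remove? kept1 m).getD kept1, ct1 - m)
          | none => (kept1, ct1)   -- unreachable: kept1 is nonempty
        else (kept1, ct1)
      let lateness := s.2 - deadline
      pvBLoop rest s.1 s.2 (if decide (lateness > max_lateness) then lateness else max_lateness)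
    | _ => max_lateness      -- unreachable under Pre_: Python raises ValueError (unpack)

def minimize_max_lateness_alt (tasks : List (List Int)) : Int :=
  pvBLoop (PySem.List.sorted tasks (fun x => PySem.List.pyGetD x 1 0)) [] 0 0

-- ===== PRECONDITION & SPEC =====
-- Python's `for duration, deadline in tasks` raises ValueError unless every task has
-- exactly two entries; Pre_ excludes exactly those raising inputs.
def Pre_minimize_max_lateness (tasks : List (List Int)) : Prop := ∀ t ∈ tasks, t.length = 2
instance (tasks : List (List Int)) : Decidable (Pre_minimize_max_lateness tasks) := by
  unfold Pre_minimize_max_lateness; infer_instance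

def pvWitness_minimize_max_lateness : List (List Int) := [[3, 4], [2, 2], [5, 6]]

def Spec_minimize_max_lateness (tasks : List (List Int)) (out : Int) : Prop := out = minimize_max_lateness_alt tasks
instance (tasks : List (List Int)) (out : Int) : Decidable (Spec_minimize_max_lateness tasks out) := by unfold Spec_minimize_max_lateness; infer_instance

-- ===== CLAIM (what is proved, stated in full; the proofs are below) =====
def Claim_equal_minimize_max_lateness : Prop := ∀ (tasks : List (List Int)), Dom_minimize_max_lateness tasks → Pre_minimize_max_lateness tasks → Spec_minimize_max_lateness tasks (minimize_max_lateness tasks)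

-- ===== LEMMAS AND PROOFS =====

-- PySem's keyless max? agrees with core List.max?.
theorem pvMaxId_eq_max? (l : List Int) : PySem.List.max? l (fun y => y) = l.max? := by
  cases l with
  | nil => rfl
  | cons x xs => rw [PySem.List.max?_id_cons, List.max?_cons']

theorem pvMax?_perm (l l' : List Int) (h : l.Perm l') : l.max? = l'.max? := by
  cases hl : l.max? with
  | none =>
    rw [List.max?_eq_none_iff] at hl
    subst hl
    rw [h.symm.eq_nil]; rfl
  | some a =>
    rw [List.max?_eq_some_iff] at hl
    rw [eq_comm, List.max?_eq_some_iff]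
    exact ⟨h.mem_iff.mp hl.1, fun b hb => hl.2 b (h.mem_iff.mpr hb)⟩

theorem pvFoldlMinNeg (xs : List Int) (x : Int) :
    (xs.map (fun a => -a)).foldl min (-x) = -(xs.foldl max x) := by
  induction xs generalizing x with
  | nil => simp
  | cons y ys ih =>
    have h : min (-x) (-y) = -(max x y) := by omega
    simp only [List.map_cons, List.foldl_cons, h, ih]

theorem pvNegInj : Function.Injective (fun a : Int => -a) := fun a b h => by
  simpa using h

-- The two loops agree whenever the kept durations are (as a multiset) the negations of
-- the heap's contents and the running maximum is nonnegative.
theorem pvLoop_eq : ∀ (ts : List (List Int)) (heap kept : List Int) (ct ml : Int),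
    0 ≤ ml → (heap.map (fun a => -a)).Perm kept → (∀ t ∈ ts, t.length = 2) →
    pvALoop ts heap ct ml = pvBLoop ts kept ct ml := by
  intro ts
  induction ts with
  | nil => intro _ _ _ _ _ _ _; rfl
  | cons t rest ih =>
    intro heap kept ct ml hml hperm hlen
    obtain ⟨d, dl, rfl⟩ := List.length_eq_two.mp (hlen t (List.mem_cons_self))
    have hrest : ∀ u ∈ rest, u.length = 2 := fun u hu => hlen u (List.mem_cons_of_mem _ hu)
    -- perm after the push
    have hkep : (d :: kept).Perm (kept ++ [d]) := (List.perm_append_singleton d kept).symm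
    have hperm1 : (((-d) :: heap).map (fun a => -a)).Perm (kept ++ [d]) := by
      simp only [List.map_cons, neg_neg]
      exact (hperm.cons d).trans hkep
    simp only [pvALoop, pvBLoop]
    by_cases hc : ct + d > dl
    · -- popped value on the A side
      have hm : heap.foldl min (-d) = -((heap.map (fun a => -a)).foldl max d) := by
        have h0 := pvFoldlMinNeg (heap.map (fun a => -a)) d
        simpa [List.map_map, Function.comp, neg_neg] using h0
      set M : Int := (heap.map (fun a => -a)).foldl max d with hM
      -- B's max over kept1
      have hmaxB0 : (kept ++ [d]).max? = some M := by
        rw [← pvMax?_perm _ _ hperm1]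
        simp only [List.map_cons, neg_neg, List.max?_cons', hM]
      have hmaxB : PySem.List.max? (kept ++ [d]) (fun y => y) = some M := by
        rw [pvMaxId_eq_max?, hmaxB0]
      have hMmem : M ∈ kept ++ [d] := (List.max?_eq_some_iff.mp hmaxB0).1
      have hrem : PySem.List.remove? (kept ++ [d]) M = some ((kept ++ [d]).erase M) :=
        PySem.List.remove?_eq_some_erase _ M hMmem
      -- perm after the removal
      have hperm2 : ((((-d) :: heap).erase (heap.foldl min (-d))).map (fun a => -a)).Perm
          ((kept ++ [d]).erase M) := by
        rw [List.map_erase pvNegInj]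
        rw [hm, neg_neg]
        exact hperm1.erase M
      simp only [pvHeapPopMin, hc, decide_true, reduceIte, hmaxB, hrem, Option.getD_some]
      have hct : ct + d - -(heap.foldl min (-d)) = ct + d - M := by rw [hm]; ring
      rw [hct]
      have hmlEq : max ml (max 0 (ct + d - M - dl)) =
          (if decide (ct + d - M - dl > ml) = true then ct + d - M - dl else ml) := by
        split_ifs with h <;> simp only [decide_eq_true_eq] at h <;> omega
      rw [hmlEq]
      refine ih _ _ _ _ ?_ hperm2 hrest
      split_ifs with h <;> simp only [decide_eq_true_eq] at h <;> omega
    · simp only [hc, decide_false, Bool.false_eq_true, if_false]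
      have hmlEq : max ml (max 0 (ct + d - dl)) =
          (if decide (ct + d - dl > ml) = true then ct + d - dl else ml) := by
        split_ifs with h <;> simp only [decide_eq_true_eq] at h <;> omega
      rw [hmlEq]
      refine ih _ _ _ _ ?_ hperm1 hrest
      split_ifs with h <;> simp only [decide_eq_true_eq] at h <;> omega

-- ===== VERDICT (by name: the statement is the Claim_ definition above) =====
theorem minimize_max_lateness_spec : Claim_equal_minimize_max_lateness := by
  intro tasks _ hpre
  unfold Spec_minimize_max_lateness minimize_max_lateness minimize_max_lateness_alt
  exact pvLoop_eq _ [] [] 0 0 le_rfl (List.Perm.refl []) (by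
    intro t ht
    exact hpre t ((PySem.List.mem_sorted _ _ _ _).mp ht))
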